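-- pv_equiv track=rewrite | github.com/namelessan/the-shell | subshell.py | get_subcmd
-- ===== SOURCE A (Python) =====
-- def find_parenth(raw_input):
--     try:
--         i = raw_input.index('(')
--         j = raw_input.index(')')
--         while j < i:
--             try:
--                 j = raw_input[j+1:].index(')') + (j + 1)
--                 if i < j:
--                     break
--             except ValueError:
--                 break
--         return i, j
--     except Exception as e:
--         raise e # test
--         return 'Not found bracket'
--
-- def get_subcmd(raw_input):
--     res = []
--     i, j = find_parenth(raw_input)
--     res.append(raw_input[i+1:j].strip().split())
--     rem_string = raw_input[j+1:]
--     if '(' in rem_string: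
--         res.extend(get_subcmd(rem_string))
--     return res
-- ===== SOURCE B (Python) =====
-- def get_subcmd(raw_input):
--     # Single forward scan over the original string with an index pointer:
--     # no find_parenth helper, no repeated slicing of the remainder.
--     res = []
--     pos = raw_input.index('(')          # ValueError if no '(' at all, like A
--     while pos != -1:
--         j = raw_input.index(')', pos)   # first ')' at or after this '(' (ValueError if none)
--         res.append(raw_input[pos + 1:j].strip().split())
--         pos = raw_input.find('(', j + 1)
--     return res
-- ===== Notes on version B (the rewrite author's own statement) =====
-- stated objective: simpler
-- what changed: A's find_parenth helper (with its backward-compensating while loop over ')' positions) and the recursion on sliced remainder strings are replaced by one forward scan over the original string using an index pointer: repeatedly locate the next '(' and the first ')' after it with index/find start offsets, so no helper, no recursion and no remainder slicing remain.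
import Mathlib
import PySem

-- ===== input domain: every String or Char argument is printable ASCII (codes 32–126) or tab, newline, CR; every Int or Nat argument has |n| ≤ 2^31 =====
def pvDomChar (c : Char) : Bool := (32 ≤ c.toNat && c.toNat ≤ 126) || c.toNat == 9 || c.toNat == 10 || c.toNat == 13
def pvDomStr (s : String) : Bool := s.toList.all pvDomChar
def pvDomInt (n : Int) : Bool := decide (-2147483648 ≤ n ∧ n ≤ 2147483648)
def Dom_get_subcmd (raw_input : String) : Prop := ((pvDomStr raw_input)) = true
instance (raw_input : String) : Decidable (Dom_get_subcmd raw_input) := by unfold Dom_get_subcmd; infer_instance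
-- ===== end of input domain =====

-- B replaces A's find_parenth helper + recursion on sliced remainders by one forward scan
-- of the original string with an index pointer; objective: simpler.


-- ===== PORT A =====
-- (termination lemmas, cited by name in decreasing_by, sit just above each definition)
theorem fpLoop_dec {l : List Char} {j k : Nat}
    (h : PySem.List.index? (l.drop (j+1)) ')' = some k) :
    l.length - (k + (j+1)) < l.length - j := by
  have hk := (PySem.List.getElem_of_index?_eq_some h).1
  simp [List.length_drop] at hk
  omega

-- find_parenth's while loop: keeps advancing j to the next ')' while j < i; exact port of the
-- 'except ValueError: break' as the none-branch. Terminates since j strictly increases below l.length.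
def fpLoop (l : List Char) (i j : Nat) : Nat :=
  if j < i then
    match h : PySem.List.index? (l.drop (j+1)) ')' with
    | none => j
    | some k =>
      let j' := k + (j + 1)
      if i < j' then j' else fpLoop l i j'
  else j
termination_by l.length - j
decreasing_by exact fpLoop_dec h

-- find_parenth; none = the ValueError propagated by 'raise e' (a parenthesis absent).
def find_parenth (l : List Char) : Option (Nat × Nat) :=
  match PySem.List.index? l '(' with
  | none => none
  | some i =>
    match PySem.List.index? l ')' with
    | none => none
    | some j => some (i, fpLoop l i j)

theorem core_dec {l : List Char} {i j : Nat}
    (h : find_parenth l = some (i, j)) : (l.drop (j+1)).length < l.length := by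
  have hl : l ≠ [] := by
    intro hnil; subst hnil; simp [find_parenth, PySem.List.index?] at h
  cases l with
  | nil => exact absurd rfl hl
  | cons a t => simp [List.length_drop]

-- A's recursive body on List Char; [] in the none-branch stands for the propagated exception (outside Pre_).
def get_subcmd_core (l : List Char) : List (List String) :=
  match h : find_parenth l with
  | none => []
  | some (i, j) =>
    let tok := (PySem.Chars.split₀ (PySem.Chars.strip ((l.drop (i+1)).take (j - (i+1))))).map String.ofList
    let rem := l.drop (j+1)
    tok :: (if PySem.Chars.isIn ['('] rem then get_subcmd_core rem else [])
termination_by l.length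
decreasing_by exact core_dec h

def get_subcmd (raw_input : String) : List (List String) := get_subcmd_core raw_input.toList

-- ===== PORT B =====
-- raw.index(c, pos) / raw.find(c, pos) for a single character c and a nonnegative start pos:
-- exact as the first occurrence in the suffix l.drop pos, shifted back (none = not found).
def chrFrom (l : List Char) (c : Char) (pos : Nat) : Option Nat :=
  (PySem.List.index? (l.drop pos) c).map (· + pos)

theorem chrFrom_some_bounds {l : List Char} {c : Char} {pos j : Nat}
    (h : chrFrom l c pos = some j) : pos ≤ j ∧ j < l.length := by
  simp only [chrFrom, Option.map_eq_some_iff] at h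
  obtain ⟨k, hk, rfl⟩ := h
  have hb := (PySem.List.getElem_of_index?_eq_some hk).1
  simp [List.length_drop] at hb
  omega

theorem bLoop_dec {l : List Char} {pos j p : Nat}
    (h : chrFrom l ')' pos = some j) (h2 : chrFrom l '(' (j+1) = some p) :
    l.length - p < l.length - pos := by
  have a := chrFrom_some_bounds h
  have b := chrFrom_some_bounds h2
  omega

-- B's while loop: pos points at the current '(', res is the accumulator.
def bLoop (l : List Char) (pos : Nat) (res : List (List String)) : List (List String) :=
  match h : chrFrom l ')' pos with
  | none => res   -- ValueError from raw_input.index(')', pos): outside Pre_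
  | some j =>
    let res' := res ++ [(PySem.Chars.split₀ (PySem.Chars.strip ((l.drop (pos+1)).take (j - (pos+1))))).map String.ofList]
    match h2 : chrFrom l '(' (j+1) with
    | none => res'   -- find returned -1: the while condition fails, return res
    | some p => bLoop l p res'
termination_by l.length - pos
decreasing_by exact bLoop_dec h h2

def get_subcmd_alt (raw_input : String) : List (List String) :=
  match chrFrom raw_input.toList '(' 0 with
  | none => []   -- ValueError from raw_input.index('('): outside Pre_
  | some pos => bLoop raw_input.toList pos []

-- ===== PRECONDITION & SPEC =====
-- Pre_: exactly the inputs on which Python A returns (no ValueError at any recursion depth):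
-- an opening parenthesis occurs, and every opening parenthesis has a closing one strictly after it.
def Pre_get_subcmd (raw_input : String) : Prop :=
  '(' ∈ raw_input.toList ∧
  ∀ p < raw_input.toList.length, raw_input.toList[p]! = '(' →
    ∃ q < raw_input.toList.length, p < q ∧ raw_input.toList[q]! = ')'
instance (raw_input : String) : Decidable (Pre_get_subcmd raw_input) := by
  unfold Pre_get_subcmd; infer_instance

def pvWitness_get_subcmd : String := "(a)"

def Spec_get_subcmd (raw_input : String) (out : List (List String)) : Prop := out = get_subcmd_alt raw_input
instance (raw_input : String) (out : List (List String)) : Decidable (Spec_get_subcmd raw_input out) := by unfold Spec_get_subcmd; infer_instance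

-- ===== CLAIM (what is proved, stated in full; the proofs are below) =====
def Claim_equal_get_subcmd : Prop := ∀ (raw_input : String), Dom_get_subcmd raw_input → Pre_get_subcmd raw_input → Spec_get_subcmd raw_input (get_subcmd raw_input)

-- ===== LEMMAS AND PROOFS =====

-- Pre_'s second clause, as a proof-side predicate on char lists.
def HasClose (l : List Char) : Prop :=
  ∀ p, (hp : p < l.length) → l[p] = '(' → ∃ q, ∃ hq : q < l.length, p < q ∧ l[q] = ')'

theorem hasClose_drop (l : List Char) (m : Nat) (h : HasClose l) : HasClose (l.drop m) := by
  intro p hp hc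
  have hlen : m + p < l.length := by simp [List.length_drop] at hp; omega
  obtain ⟨q, hq, hpq, hqc⟩ := h (m + p) hlen (by simpa using hc)
  refine ⟨q - m, by simp [List.length_drop]; omega, by omega, ?_⟩
  have : m + (q - m) = q := by omega
  simp [List.getElem_drop, this, hqc]

-- converse of getElem_of_index?_eq_some: first occurrence characterises index?.
theorem index?_eq_some_of (l : List Char) (c : Char) (k : Nat) (hk : k < l.length)
    (hc : l[k] = c) (hmin : ∀ j, (hj : j < k) → l[j]'(by omega) ≠ c) :
    PySem.List.index? l c = some k := by
  rw [PySem.List.index?_eq_some_iff]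
  refine ⟨l.take k, l.drop (k+1), ?_, by simp; omega, ?_⟩
  · conv_lhs => rw [← List.take_append_drop k l]
    congr 1
    rw [List.drop_eq_getElem_cons hk, hc]
  · intro hmem
    obtain ⟨j, hj, hje⟩ := List.mem_iff_getElem.mp hmem
    have hjk : j < k := by simp at hj; omega
    exact hmin j hjk (by simpa [List.getElem_take] using hje)

-- 'c in rem' for a single character is membership.
theorem isIn_singleton (c : Char) (rem : List Char) :
    PySem.Chars.isIn [c] rem = true ↔ c ∈ rem := by
  rw [PySem.Chars.isIn_iff_infix, List.singleton_infix_iff]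

-- fpLoop stops at fj, the first ')' strictly after i, as soon as it starts at a ')' index ≤ fj
-- (given that l[i] is '(' so the start cannot sit at i).
theorem fpLoop_eq (l : List Char) (i fj : Nat)
    (hfc : l[fj]? = some ')') (hgt : i < fj) (hic : l[i]? = some '(')
    (hmin : ∀ q, i < q → q < fj → l[q]? ≠ some ')') :
    ∀ n j, fj - j ≤ n → l[j]? = some ')' → j ≤ fj → fpLoop l i j = fj := by
  intro n
  induction n with
  | zero =>
    intro j hn _ hjf
    have hj : j = fj := by omega
    subst hj
    rw [fpLoop]
    have hnot : ¬ j < i := by omega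
    simp [hnot]
  | succ n ih =>
    intro j hn hjc hjf
    rw [fpLoop]
    by_cases hji : j < i
    · simp only [hji, if_true]
      have hjfj : j < fj := by omega
      have hde : (l.drop (j+1))[fj - (j+1)]? = some ')' := by
        rw [List.getElem?_drop, show j + 1 + (fj - (j+1)) = fj from by omega, hfc]
      have hmem : ')' ∈ l.drop (j+1) := List.mem_iff_getElem?.mpr ⟨_, hde⟩
      cases hk : PySem.List.index? (l.drop (j+1)) ')' with
      | none => rw [PySem.List.index?_eq_none_iff] at hk; exact absurd hmem hk
      | some k =>
        obtain ⟨hkl, hkc, hkmin⟩ := PySem.List.getElem_of_index?_eq_some hk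
        have hkc' : l[k + (j+1)]? = some ')' := by
          rw [show k + (j+1) = j + 1 + k from by omega, ← List.getElem?_drop,
            List.getElem?_eq_getElem hkl, hkc]
        have hkfj : k + (j+1) ≤ fj := by
          by_contra hcon
          have hlt : fj - (j+1) < k := by omega
          have := hkmin (fj - (j+1)) hlt
          rw [List.getElem?_eq_getElem (by omega)] at hde
          exact this (by injection hde)
        simp only
        by_cases hik : i < k + (j+1)
        · have heq : k + (j+1) = fj := by
            by_contra hne
            exact hmin (k + (j+1)) hik (by omega) hkc'
          rw [if_pos hik, heq]
        · simp only [hik, if_false]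
          exact ih (k + (j+1)) (by omega) hkc' (by omega)
    · have hj : j = fj := by
        by_contra hne
        have hjfj : j < fj := by omega
        by_cases hij : i = j
        · rw [← hij, hic] at hjc
          exact absurd (by injection hjc) (by decide : ¬ ('(' : Char) = ')')
        · exact hmin j (by omega) hjfj hjc
      rw [if_neg hji]
      exact hj

-- find_parenth under Pre_: first '(' at i, first ')' after i at fj.
theorem find_parenth_eq (l : List Char) (i fj : Nat)
    (hi : PySem.List.index? l '(' = some i)
    (hfc : l[fj]? = some ')') (hgt : i < fj)
    (hmin : ∀ q, i < q → q < fj → l[q]? ≠ some ')') :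
    find_parenth l = some (i, fj) := by
  obtain ⟨hil, hic, _⟩ := PySem.List.getElem_of_index?_eq_some hi
  have hic' : l[i]? = some '(' := by rw [List.getElem?_eq_getElem hil, hic]
  have hmem : ')' ∈ l := List.mem_iff_getElem?.mpr ⟨_, hfc⟩
  cases hj0 : PySem.List.index? l ')' with
  | none => rw [PySem.List.index?_eq_none_iff] at hj0; exact absurd hmem hj0
  | some j0 =>
    obtain ⟨hj0l, hj0c, hj0min⟩ := PySem.List.getElem_of_index?_eq_some hj0
    have hj0c' : l[j0]? = some ')' := by rw [List.getElem?_eq_getElem hj0l, hj0c]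
    have hj0fj : j0 ≤ fj := by
      by_contra hcon
      have := hj0min fj (by omega)
      rw [List.getElem?_eq_getElem (by
        rcases List.getElem?_eq_some_iff.mp hfc with ⟨h, _⟩; exact h)] at hfc
      exact this (by injection hfc)
    unfold find_parenth
    simp only [hi, hj0]
    rw [fpLoop_eq l i fj hfc hgt hic' hmin (fj - j0) j0 (by omega) hj0c' hj0fj]

-- searching from a shifted start = searching the dropped suffix.
theorem chrFrom_shift (l : List Char) (c : Char) (m q : Nat) :
    chrFrom l c (m + q) = (chrFrom (l.drop m) c q).map (· + m) := by
  unfold chrFrom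
  rw [List.drop_drop, Option.map_map]
  congr 1
  funext x
  simp [Function.comp]
  omega

-- the pointer loop only ever looks at the suffix from its pointer.
theorem bLoop_shift (l : List Char) (m : Nat) :
    ∀ q res, bLoop l (m + q) res = bLoop (l.drop m) q res := by
  intro q res
  fun_induction bLoop (l.drop m) q res with
  | case1 q res h =>
    rw [bLoop, chrFrom_shift]
    split
    · rfl
    · rename_i j' heq; rw [h] at heq; simp at heq
  | case2 q res j h res' h2 =>
    rw [bLoop, chrFrom_shift]
    split
    · rename_i heq; simp [h] at heq
    · rename_i j' heq
      rw [h] at heq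
      simp only [Option.map_some, Option.some.injEq] at heq
      subst heq
      have h2' : chrFrom l '(' (j + m + 1) = none := by
        rw [show j + m + 1 = m + (j + 1) from by omega, chrFrom_shift, h2, Option.map_none]
      split
      · have hdr : List.drop (m + q + 1) l = List.drop (q + 1) (List.drop m l) := by
          rw [List.drop_drop, Nat.add_assoc]
        have harg : j + m - (m + q + 1) = j - (q + 1) := by omega
        rw [hdr, harg]
      · rename_i p heq2; rw [h2'] at heq2; simp at heq2
  | case3 q res j h res' p h2 ih =>
    rw [bLoop, chrFrom_shift]
    split
    · rename_i heq; simp [h] at heq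
    · rename_i j' heq
      rw [h] at heq
      simp only [Option.map_some, Option.some.injEq] at heq
      subst heq
      have h2' : chrFrom l '(' (j + m + 1) = some (p + m) := by
        rw [show j + m + 1 = m + (j + 1) from by omega, chrFrom_shift, h2, Option.map_some]
      split
      · rename_i heq2; rw [h2'] at heq2; simp at heq2
      · rename_i p' heq2
        rw [h2'] at heq2
        injection heq2 with heq2
        subst heq2
        have hdr : List.drop (m + q + 1) l = List.drop (q + 1) (List.drop m l) := by
          rw [List.drop_drop, Nat.add_assoc]
        have harg : j + m - (m + q + 1) = j - (q + 1) := by omega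
        rw [hdr, harg, show p + m = m + p from by omega]
        exact ih

-- main invariant: from the first '(' of l, B's pointer loop appends exactly A's recursion output.
theorem bLoop_eq_core : ∀ (n : Nat) (l : List Char), l.length ≤ n → HasClose l →
    ∀ i res, PySem.List.index? l '(' = some i →
    bLoop l i res = res ++ get_subcmd_core l := by
  intro n
  induction n with
  | zero =>
    intro l hl _ i res hi
    have : l = [] := by cases l with | nil => rfl | cons a t => simp at hl
    subst this
    simp [PySem.List.index?_eq_idxOf?] at hi
  | succ n ih =>
    intro l hl hcl i res hi
    obtain ⟨hil, hic, _⟩ := PySem.List.getElem_of_index?_eq_some hi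
    obtain ⟨q0, hq0, hiq0, hq0c⟩ := hcl i hil hic
    have hex : ∃ q, i < q ∧ l[q]? = some ')' :=
      ⟨q0, hiq0, by rw [List.getElem?_eq_getElem hq0, hq0c]⟩
    set fj := Nat.find hex with hfjdef
    obtain ⟨hgt, hfc⟩ := Nat.find_spec hex
    rw [← hfjdef] at hgt hfc
    have hmin : ∀ q, i < q → q < fj → l[q]? ≠ some ')' := by
      intro q h1 h2 hc
      exact Nat.find_min hex h2 ⟨h1, hc⟩
    have hfjl : fj < l.length := by
      rcases List.getElem?_eq_some_iff.mp hfc with ⟨h, _⟩; exact h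
    -- find_parenth agrees
    have hfp : find_parenth l = some (i, fj) := find_parenth_eq l i fj hi hfc hgt hmin
    -- chrFrom from i finds fj
    have hchr : chrFrom l ')' i = some fj := by
      obtain ⟨hfb, hfval⟩ := List.getElem?_eq_some_iff.mp hfc
      have hidx : PySem.List.index? (l.drop i) ')' = some (fj - i) := by
        refine index?_eq_some_of (l.drop i) ')' (fj - i) (by simp [List.length_drop]; omega) ?_ ?_
        · simp only [List.getElem_drop]
          simp only [show i + (fj - i) = fj from by omega]
          exact hfval
        · intro j hj hc
          simp only [List.getElem_drop] at hc
          have hjfj : j < fj - i := hj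
          have hc' : l[i + j]? = some ')' := by
            rw [List.getElem?_eq_getElem (by omega), hc]
          rcases Nat.eq_zero_or_pos j with hj0 | hj0
          · subst hj0
            rw [show i + 0 = i from by omega, List.getElem?_eq_getElem hil, hic] at hc'
            exact absurd (by injection hc') (by decide : ¬ ('(' : Char) = ')')
          · exact hmin (i + j) (by omega) (by omega) hc'
      unfold chrFrom
      rw [hidx, Option.map_some]
      congr 1
      omega
    rw [bLoop]
    split
    · rename_i heq; rw [hchr] at heq; simp at heq
    · rename_i j heq
      rw [hchr] at heq
      injection heq with heq
      subst heq
      have hcore : get_subcmd_core l =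
          ((PySem.Chars.split₀ (PySem.Chars.strip ((l.drop (i+1)).take (fj - (i+1))))).map String.ofList) ::
          (if PySem.Chars.isIn ['('] (l.drop (fj+1)) then get_subcmd_core (l.drop (fj+1)) else []) := by
        rw [get_subcmd_core.eq_def]
        split
        · rename_i h'; rw [h'] at hfp; exact absurd hfp (by simp)
        · rename_i i' fj' h'
          rw [h'] at hfp
          simp only [Option.some.injEq, Prod.mk.injEq] at hfp
          obtain ⟨rfl, rfl⟩ := hfp
          rfl
      rw [hcore]
      cases hnext : PySem.List.index? (l.drop (fj + 1)) '(' with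
      | none =>
        have hiso : PySem.Chars.isIn ['('] (l.drop (fj + 1)) = false := by
          rw [← Bool.not_eq_true, isIn_singleton]
          exact (PySem.List.index?_eq_none_iff _ _).mp hnext
        have hch2 : chrFrom l '(' (fj + 1) = none := by
          unfold chrFrom; rw [hnext]; rfl
        split
        · simp [hiso]
        · rename_i p heq3; rw [hch2] at heq3; simp at heq3
      | some k =>
        have hiso : PySem.Chars.isIn ['('] (l.drop (fj + 1)) = true := by
          rw [isIn_singleton]
          have hg := PySem.List.getElem_of_index?_eq_some hnext
          exact List.mem_iff_getElem.mpr ⟨k, hg.1, hg.2.1⟩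
        have hch2 : chrFrom l '(' (fj + 1) = some (k + (fj + 1)) := by
          unfold chrFrom; rw [hnext]; rfl
        split
        · rename_i heq3; rw [hch2] at heq3; simp at heq3
        · rename_i p heq3
          rw [hch2] at heq3
          injection heq3 with heq3
          subst heq3
          rw [show k + (fj + 1) = (fj + 1) + k from by omega, bLoop_shift]
          rw [ih (l.drop (fj + 1)) (by simp [List.length_drop]; omega)
            (hasClose_drop l (fj + 1) hcl) k _ hnext]
          simp [hiso]

-- ===== VERDICT (by name: the statement is the Claim_ definition above) =====
theorem get_subcmd_spec : Claim_equal_get_subcmd := by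
  intro raw _ hpre
  unfold Spec_get_subcmd get_subcmd get_subcmd_alt
  obtain ⟨hmem, hcl0⟩ := hpre
  have hcl : HasClose raw.toList := by
    intro p hp hc
    obtain ⟨q, hq, hpq, hqc⟩ := hcl0 p hp (by rw [getElem!_pos raw.toList p hp]; exact hc)
    exact ⟨q, hq, hpq, by rw [← getElem!_pos raw.toList q hq]; exact hqc⟩
  cases hidx : PySem.List.index? raw.toList '(' with
  | none => exact absurd ((PySem.List.index?_eq_none_iff _ _).mp hidx) (by simp; exact hmem)
  | some i =>
    have hc0 : chrFrom raw.toList '(' 0 = some i := by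
      unfold chrFrom; rw [List.drop_zero, hidx]; simp
    split
    · rename_i heq; rw [hc0] at heq; simp at heq
    · rename_i pos heq
      rw [hc0] at heq
      injection heq with heq
      rw [← heq]
      rw [bLoop_eq_core raw.toList.length raw.toList le_rfl hcl i [] hidx]
      simp
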